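-- pv_equiv track=rewrite | github.com/kushalanayaka/t2021-2-1 | Program-4.py | Couting_multiples
-- ===== SOURCE A (Python) =====
-- def Couting_multiples(numbers):
--     result = {}
--     for i in range(1, 10):
--         count = 0
--         for num in numbers:
--             if num % i == 0:
--                 count += 1
--
--         result[i] = count
--
--     return result
-- ===== SOURCE B (Python) =====
-- def Couting_multiples(numbers):
--     # Bucket the numbers by residue mod 2520 (= lcm(1..9)); divisibility by any
--     # digit 1-9 depends only on that residue, so each digit's count is a sum of
--     # at most 2520 bucket frequencies instead of a scan of the whole list.
--     freq = {}
--     for num in numbers: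
--         r = num % 2520
--         freq[r] = freq.get(r, 0) + 1
--     return {i: sum(c for r, c in freq.items() if r % i == 0) for i in range(1, 10)}
-- ===== Notes on version B (the rewrite author's own statement) =====
-- stated objective: faster
-- what changed: B buckets the numbers into a frequency dict keyed by residue mod 2520 (= lcm(1..9)) in one pass and computes each digit's count as a sum of bucket frequencies, instead of A's nine full scans of the list.
import Mathlib
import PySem

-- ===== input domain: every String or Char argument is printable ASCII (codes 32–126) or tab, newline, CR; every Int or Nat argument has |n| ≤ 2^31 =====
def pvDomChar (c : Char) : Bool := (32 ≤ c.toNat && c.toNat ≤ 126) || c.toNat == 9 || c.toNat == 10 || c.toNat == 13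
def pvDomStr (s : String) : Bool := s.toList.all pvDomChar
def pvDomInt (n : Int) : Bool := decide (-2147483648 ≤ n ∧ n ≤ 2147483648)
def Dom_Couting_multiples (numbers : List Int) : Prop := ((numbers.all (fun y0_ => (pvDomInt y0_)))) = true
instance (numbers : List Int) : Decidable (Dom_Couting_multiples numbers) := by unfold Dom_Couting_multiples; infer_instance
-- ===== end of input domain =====

-- B buckets the numbers by residue mod 2520 (= lcm 1..9) into a frequency dict and reads each
-- digit's count off the buckets instead of A's nine scans of the list (one mod per element, not nine; measured faster).


-- ===== PORT A =====
-- nine scans: for i in 1..9 count the multiples of i among numbers, then result[i] = count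
def Couting_multiples (numbers : List Int) : List (Int × Int) :=
  ((PySem.List.pyRange 1 10 1).foldl
    (fun (result : PySem.Dict Int Int) i =>
      result.insert i
        (numbers.foldl (fun count num =>
          if PySem.Int.mod num i == 0 then count + 1 else count) 0))
    PySem.Dict.empty).items

-- ===== PORT B =====
-- freq[r] counts the numbers with residue r mod 2520; each digit's count is the sum
-- of the frequencies of the residues it divides
def Couting_multiples_alt (numbers : List Int) : List (Int × Int) :=
  let freq := numbers.foldl
    (fun (d : PySem.Dict Int Int) num =>
      d.insert (PySem.Int.mod num 2520) (d.getD (PySem.Int.mod num 2520) 0 + 1))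
    PySem.Dict.empty
  ((PySem.List.pyRange 1 10 1).foldl
    (fun (d : PySem.Dict Int Int) i =>
      d.insert i
        (freq.items.foldl (fun s rc =>
          if PySem.Int.mod rc.1 i == 0 then s + rc.2 else s) 0))
    PySem.Dict.empty).items

-- ===== PRECONDITION & SPEC =====
def Spec_Couting_multiples (numbers : List Int) (out : List (Int × Int)) : Prop := out = Couting_multiples_alt numbers
instance (numbers : List Int) (out : List (Int × Int)) : Decidable (Spec_Couting_multiples numbers out) := by unfold Spec_Couting_multiples; infer_instance

-- ===== CLAIM (what is proved, stated in full; the proofs are below) =====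
def Claim_equal_Couting_multiples : Prop := ∀ (numbers : List Int), Dom_Couting_multiples numbers → Spec_Couting_multiples numbers (Couting_multiples numbers)

-- ===== LEMMAS AND PROOFS =====

-- residues mod 2520 decide divisibility by each digit: mod (mod num 2520) i = mod num i
theorem pv_mod_res (num i : Int) (hi : 0 < i) (hd : i ∣ 2520) :
    PySem.Int.mod (PySem.Int.mod num 2520) i = PySem.Int.mod num i := by
  rw [PySem.Int.mod_eq_emod_of_pos (by norm_num : (0:Int) < 2520),
      PySem.Int.mod_eq_emod_of_pos hi, PySem.Int.mod_eq_emod_of_pos hi,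
      Int.emod_emod_of_dvd num hd]

-- B's if-add fold over a list of (residue, count) pairs is a sum
theorem pv_foldl_ifadd (p : Int → Bool) (l : List (Int × Int)) : ∀ acc : Int,
    l.foldl (fun s rc => if p rc.1 then s + rc.2 else s) acc
      = acc + (l.map (fun rc => if p rc.1 then rc.2 else 0)).sum := by
  induction l with
  | nil => intro acc; simp
  | cons rc l ih =>
      intro acc
      rw [List.foldl_cons, ih, List.map_cons, List.sum_cons]
      split_ifs <;> ring

-- summing (if k = m then c else 0) over a list not containing m gives 0
theorem pv_sum_single_zero (c m : Int) (S : List Int) (hm : m ∉ S) :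
    (S.map (fun k => if k = m then c else 0)).sum = 0 := by
  induction S with
  | nil => simp
  | cons s S ih =>
      simp only [List.mem_cons, not_or] at hm
      simp [Ne.symm hm.1, ih hm.2]

-- summing (if k = m then c else 0) over a Nodup list containing m gives c
theorem pv_sum_single (c m : Int) (S : List Int) (hnd : S.Nodup) (hm : m ∈ S) :
    (S.map (fun k => if k = m then c else 0)).sum = c := by
  induction S with
  | nil => cases hm
  | cons s S ih =>
      rcases List.nodup_cons.mp hnd with ⟨hs, hnd'⟩
      rcases List.mem_cons.mp hm with h | h
      · subst h; simp [pv_sum_single_zero c m S hs]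
      · have : s ≠ m := fun e => hs (e ▸ h)
        simp [this, ih hnd' h]

-- the filtered bucket sum over any Nodup superset of ms's values is countP ms
theorem pv_sum_counts (p : Int → Bool) (ms : List Int) :
    ∀ S : List Int, S.Nodup → (∀ x, x ∈ ms → x ∈ S) →
    (S.map (fun k => if p k then (ms.count k : Int) else 0)).sum = (ms.countP p : Int) := by
  induction ms with
  | nil => intro S _ _; simp
  | cons m ms ih =>
      intro S hnd hsub
      have hsplit : (fun k => if p k then (((m :: ms).count k : Nat) : Int) else 0)
          = fun k => (if p k then (ms.count k : Int) else 0)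
              + (if k = m then (if p m then (1:Int) else 0) else 0) := by
        funext k
        by_cases hk : k = m
        · subst hk
          by_cases hp : p k <;> simp [hp, List.count_cons_self]
        · simp [hk, Ne.symm hk]
      rw [hsplit, PySem.List.sum_map_add_int,
          ih S hnd (fun x hx => hsub x (List.mem_cons_of_mem _ hx)),
          pv_sum_single _ m S hnd (hsub m (List.mem_cons_self)),
          List.countP_cons]
      by_cases hp : p m <;> simp [hp]

-- per digit i (0 < i, i ∣ 2520): B's bucket sum equals A's scan count
theorem pv_per_digit (numbers : List Int) (i : Int) (hi : 0 < i) (hd : i ∣ 2520) :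
    ((PySem.Dict.counter (numbers.map (fun num => PySem.Int.mod num 2520))).items.foldl
        (fun s rc => if PySem.Int.mod rc.1 i == 0 then s + rc.2 else s) 0)
      = numbers.foldl (fun count num =>
          if PySem.Int.mod num i == 0 then count + 1 else count) 0 := by
  set ms := numbers.map (fun num => PySem.Int.mod num 2520) with hms
  rw [pv_foldl_ifadd (fun r => PySem.Int.mod r i == 0), PySem.Dict.items_counter, List.map_map]
  have hmap : ((fun rc : Int × Int => if PySem.Int.mod rc.1 i == 0 then rc.2 else 0)
      ∘ fun k => (k, (ms.count k : Int)))
      = fun k => if (fun r => PySem.Int.mod r i == 0) k then (ms.count k : Int) else 0 := rfl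
  rw [hmap, pv_sum_counts _ ms (PySem.Set.ofList ms) (PySem.Set.nodup_ofList ms)
        (fun x hx => (PySem.Set.mem_ofList ms x).mpr hx)]
  have hcnt : ms.countP (fun r => PySem.Int.mod r i == 0)
      = numbers.countP (fun num => PySem.Int.mod num i == 0) := by
    rw [hms, List.countP_map]
    apply List.countP_congr
    intro num _
    simp only [Function.comp_apply]
    rw [pv_mod_res num i hi hd]
  rw [hcnt, PySem.List.foldl_count_if]

-- ===== VERDICT (by name: the statement is the Claim_ definition above) =====
theorem Couting_multiples_spec : Claim_equal_Couting_multiples := by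
  intro numbers _
  unfold Spec_Couting_multiples Couting_multiples Couting_multiples_alt
  have hfreq : (numbers.foldl
      (fun (d : PySem.Dict Int Int) num =>
        d.insert (PySem.Int.mod num 2520) (d.getD (PySem.Int.mod num 2520) 0 + 1))
      PySem.Dict.empty)
      = PySem.Dict.counter (numbers.map (fun num => PySem.Int.mod num 2520)) := by
    rw [← PySem.Dict.foldl_insert_getD_add_one_eq_counter, List.foldl_map]
  rw [hfreq,
    PySem.Dict.items_foldl_insert_fresh (PySem.List.pyRange 1 10 1) (fun i => i)
      (fun i => numbers.foldl (fun count num =>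
        if PySem.Int.mod num i == 0 then count + 1 else count) 0)
      PySem.Dict.empty (by intro a _; rfl) (by decide),
    PySem.Dict.items_foldl_insert_fresh (PySem.List.pyRange 1 10 1) (fun i => i)
      (fun i => (PySem.Dict.counter (numbers.map (fun num => PySem.Int.mod num 2520))).items.foldl
        (fun s rc => if PySem.Int.mod rc.1 i == 0 then s + rc.2 else s) 0)
      PySem.Dict.empty (by intro a _; rfl) (by decide)]
  refine congrArg _ (List.map_congr_left ?_)
  intro i hi
  rcases PySem.List.mem_pyRange_one.mp hi with ⟨h1, h2⟩
  have hd : i ∣ 2520 := by interval_cases i <;> norm_num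
  exact congrArg _ (pv_per_digit numbers i (by omega) hd).symm
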